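-- pv_equiv track=rewrite | github.com/mattclarke/FallingDiamonds | main.py | populate_columns
-- ===== SOURCE A (Python) =====
-- def populate_columns(left_col, right_col, num_free):
--     def _fill_column(col, num_free):
--         while True:
--             if num_free == 0:
--                 return 0
--             if col[-1]:
--                 # All of the column is full
--                 return num_free
--             # Fill the first unfilled space
--             col[col.index(False)] = True
--             num_free -= 1
--     # Fill the right-hand column first
--     num_free = _fill_column(right_col, num_free)
--     _fill_column(left_col, num_free)
--     return left_col, right_col
-- ===== SOURCE B (Python) =====
-- def _fill_fast(col, free):
--     # A stops as soon as the LAST slot is True, so such a column accepts nothing.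
--     if free <= 0 or not col or col[-1]:
--         return free
--     j = free
--     for i, v in enumerate(col):
--         if j <= 0:
--             break
--         if not v:
--             col[i] = True
--             j -= 1
--     return j
--
--
-- def populate_columns(left_col, right_col, num_free):
--     rem = _fill_fast(right_col, num_free)
--     _fill_fast(left_col, rem)
--     return left_col, right_col
-- ===== Notes on version B (the rewrite author's own statement) =====
-- stated objective: alternative
-- what changed: Instead of re-scanning the column from the start with col.index(False) once per filled slot, B makes a single early-exit pass that fills False slots while a budget counter lasts (after an O(1) full-column check), so the repeated inner scans disappear.
-- outside the precondition, e.g. on populate_columns([False], [True], -1): A returns ([True], [True]), B returns ([False], [True])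
import Mathlib
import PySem

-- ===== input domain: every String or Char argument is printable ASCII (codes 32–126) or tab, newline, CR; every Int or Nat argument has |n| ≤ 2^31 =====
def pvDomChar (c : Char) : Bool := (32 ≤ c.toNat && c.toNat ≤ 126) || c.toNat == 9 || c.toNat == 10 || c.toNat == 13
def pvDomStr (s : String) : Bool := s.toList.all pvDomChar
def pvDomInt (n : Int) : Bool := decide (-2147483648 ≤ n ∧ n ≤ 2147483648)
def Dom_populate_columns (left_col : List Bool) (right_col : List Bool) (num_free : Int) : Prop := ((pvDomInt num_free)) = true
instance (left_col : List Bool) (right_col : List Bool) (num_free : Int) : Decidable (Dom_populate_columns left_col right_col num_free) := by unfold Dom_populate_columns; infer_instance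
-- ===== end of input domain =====

-- B replaces A's repeated col.index(False) re-scans by one early-exit counted pass per column;
-- equivalence is about the RETURN value (both Pythons also mutate the argument lists in place,
-- in the same way).

-- ===== PORT A =====
-- col[col.index(False)] = True : set the first False element to True
def pvFillFirst : List Bool → List Bool
  | [] => []
  | false :: t => true :: t
  | true :: t => true :: pvFillFirst t

theorem pvFillFirst_count_lt (col : List Bool) (h : false ∈ col) :
    (pvFillFirst col).count false < col.count false := by
  induction col with
  | nil => cases h
  | cons a t ih =>
    cases a with
    | false => simp [pvFillFirst]
    | true =>
      have ht : false ∈ t := by simpa using h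
      simpa [pvFillFirst, List.count_cons] using ih ht

-- the inner while-loop of _fill_column; returns (mutated col, returned num_free)
def pvFillA (col : List Bool) (num_free : Int) : List Bool × Int :=
  if num_free = 0 then (col, 0)
  else
    match hl : col.getLast? with
    | none => (col, num_free)          -- Python raises IndexError on col[-1] here (outside Pre_)
    | some true => (col, num_free)     -- column full
    | some false =>
        pvFillA (pvFillFirst col) (num_free - 1)
termination_by col.count false
decreasing_by
  exact pvFillFirst_count_lt col (List.mem_of_getLast? hl)

def populate_columns (left_col : List Bool) (right_col : List Bool) (num_free : Int) : List Bool × List Bool :=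
  let r := pvFillA right_col num_free
  let l := pvFillA left_col r.2
  (l.1, r.1)

-- ===== PORT B =====
-- the single counted pass of _fill_fast: fill False slots while budget j > 0, return (col, j)
def pvMarkB : List Bool → Int → List Bool × Int
  | [], j => ([], j)
  | v :: t, j =>
      if j ≤ 0 then (v :: t, j)
      else if v then
        let p := pvMarkB t j
        (true :: p.1, p.2)
      else
        let p := pvMarkB t (j - 1)
        (true :: p.1, p.2)

-- _fill_fast: early exit when free <= 0 or the column is empty or its last slot is True
def pvFillB (col : List Bool) (free : Int) : List Bool × Int :=
  if free ≤ 0 then (col, free)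
  else if col.getLastD true then (col, free)
  else pvMarkB col free

def populate_columns_alt (left_col : List Bool) (right_col : List Bool) (num_free : Int) : List Bool × List Bool :=
  let r := pvFillB right_col num_free
  let l := pvFillB left_col r.2
  (l.1, r.1)

-- ===== PRECONDITION & SPEC =====
-- Pre_ excludes (a) inputs where A raises IndexError on col[-1] of an empty column, and
-- (b) negative num_free, outside the task's natural domain, where A's behaviour (treating a
-- negative free count as unlimited and filling every column completely) is an implementation
-- artefact that B does not mimic.
def Pre_populate_columns (left_col : List Bool) (right_col : List Bool) (num_free : Int) : Prop :=
  0 ≤ num_free ∧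
    (num_free = 0 ∨
      (right_col ≠ [] ∧
        (left_col ≠ [] ∨
          (right_col.getLastD true = false ∧ num_free ≤ (right_col.count false : Int)))))
instance (left_col : List Bool) (right_col : List Bool) (num_free : Int) : Decidable (Pre_populate_columns left_col right_col num_free) := by unfold Pre_populate_columns; infer_instance

def pvWitness_populate_columns : List Bool × List Bool × Int := ([false, false], [false, true, false], 3)

def Spec_populate_columns (left_col : List Bool) (right_col : List Bool) (num_free : Int) (out : List Bool × List Bool) : Prop := out = populate_columns_alt left_col right_col num_free
instance (left_col : List Bool) (right_col : List Bool) (num_free : Int) (out : List Bool × List Bool) : Decidable (Spec_populate_columns left_col right_col num_free out) := by unfold Spec_populate_columns; infer_instance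

-- ===== CLAIM (what is proved, stated in full; the proofs are below) =====
def Claim_equal_populate_columns : Prop := ∀ (left_col : List Bool) (right_col : List Bool) (num_free : Int), Dom_populate_columns left_col right_col num_free → Pre_populate_columns left_col right_col num_free → Spec_populate_columns left_col right_col num_free (populate_columns left_col right_col num_free)

-- ===== LEMMAS AND PROOFS =====

theorem pvMarkB_nonpos (col : List Bool) (j : Int) (hj : j ≤ 0) : pvMarkB col j = (col, j) := by
  cases col with
  | nil => rfl
  | cons v t => simp [pvMarkB, hj]

theorem pvMarkB_no_false (col : List Bool) (j : Int) (h : false ∉ col) :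
    pvMarkB col j = (col, j) := by
  induction col generalizing j with
  | nil => rfl
  | cons v t ih =>
    have hv : v = true := by
      cases v
      · exact absurd List.mem_cons_self h
      · rfl
    subst hv
    by_cases hj : j ≤ 0
    · simp [pvMarkB, hj]
    · simp only [pvMarkB, if_neg hj]
      rw [ih j (fun hm => h (List.mem_cons_of_mem _ hm))]
      simp

theorem pvMarkB_snd (col : List Bool) (j : Int) (hj : 0 ≤ j) :
    (pvMarkB col j).2 = max (j - (col.count false : Int)) 0 := by
  induction col generalizing j with
  | nil => simp [pvMarkB]; omega
  | cons v t ih =>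
    by_cases hj0 : j ≤ 0
    · have : j = 0 := le_antisymm hj0 hj
      subst this
      have : ((t.count false : Int)) ≥ 0 := by positivity
      simp [pvMarkB, List.count_cons]
      omega
    · cases v with
      | true =>
        simp only [pvMarkB, if_neg hj0]
        rw [ih j hj]
        simp
      | false =>
        simp only [pvMarkB, if_neg hj0, Bool.false_eq_true, if_false]
        rw [ih (j - 1) (by omega)]
        simp [List.count_cons]
        omega

-- one A-fill step commutes with the counted pass
theorem pvMarkB_step (col : List Bool) (k : Int) (hk : 1 ≤ k) (h : false ∈ col) :
    pvMarkB col k = pvMarkB (pvFillFirst col) (k - 1) := by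
  induction col generalizing k with
  | nil => cases h
  | cons v t ih =>
    cases v with
    | false =>
      simp only [pvFillFirst, pvMarkB, if_neg (show ¬k ≤ 0 by omega), Bool.false_eq_true,
        if_false]
      by_cases hk1 : k - 1 ≤ 0
      · rw [pvMarkB_nonpos t (k - 1) hk1]
        simp [hk1]
      · simp [hk1]
    | true =>
      have ht : false ∈ t := by simpa using h
      simp only [pvFillFirst, pvMarkB, if_neg (show ¬k ≤ 0 by omega)]
      by_cases hk1 : k - 1 ≤ 0
      · have hk1' : k = 1 := by omega
        subst hk1'
        rw [ih 1 le_rfl ht, pvMarkB_nonpos (pvFillFirst t) (1 - 1) (by omega)]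
        simp
      · simp only [if_neg hk1]
        rw [ih k hk ht]
        simp

-- filling the first False slot either keeps the last slot False or removes every False
theorem pvFillFirst_last (col : List Bool) (h : col.getLast? = some false) :
    (pvFillFirst col).getLast? = some false ∨ false ∉ pvFillFirst col := by
  induction col with
  | nil => simp at h
  | cons a t ih =>
    cases t with
    | nil =>
      simp at h
      subst h
      right
      simp [pvFillFirst]
    | cons b u =>
      have ht : (b :: u).getLast? = some false := by rw [← h, List.getLast?_cons_cons]
      cases a with
      | false =>
        left
        simpa [pvFillFirst, List.getLast?_cons_cons] using ht
      | true =>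
        rcases ih ht with hL | hR
        · left
          have hne : pvFillFirst (b :: u) ≠ [] := by cases b <;> simp [pvFillFirst]
          cases hx : pvFillFirst (b :: u) with
          | nil => exact absurd hx hne
          | cons c w =>
            rw [hx] at hL
            simpa [pvFillFirst, hx, List.getLast?_cons_cons] using hL
        · right
          simpa [pvFillFirst] using hR

theorem no_false_getLastD (col : List Bool) (h : false ∉ col) : col.getLastD true = true := by
  cases hx : col.getLast? with
  | none => simp [List.getLastD_eq_getLast?, hx]
  | some b =>
    have : b ∈ col := List.mem_of_getLast? hx
    cases b with
    | false => exact absurd this h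
    | true => simp [List.getLastD_eq_getLast?, hx]

-- main loop lemma: A's while-loop equals B's early-exit counted pass, when A does not raise
theorem fillA_eq_fillB (col : List Bool) (free : Int) (hfree : 0 ≤ free)
    (hcol : col = [] → free = 0) :
    pvFillA col free = pvFillB col free := by
  by_cases h0 : free = 0
  · subst h0
    simp [pvFillA, pvFillB]
  · rw [pvFillA, if_neg h0]
    match hl : col.getLast? with
    | none =>
      exact absurd (hcol (by simpa using hl)) h0
    | some true =>
      simp [pvFillB, List.getLastD_eq_getLast?, hl, show ¬free ≤ 0 by omega]
    | some false =>
      have hD : col.getLastD true = false := by simp [List.getLastD_eq_getLast?, hl]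
      have hmem : false ∈ col := List.mem_of_getLast? hl
      have hne : pvFillFirst col ≠ [] := by
        cases col with
        | nil => cases hmem
        | cons v t => cases v <;> simp [pvFillFirst]
      rw [fillA_eq_fillB (pvFillFirst col) (free - 1) (by omega) (fun he => absurd he hne)]
      have hRHS : pvFillB col free = pvMarkB col free := by
        simp [pvFillB, List.getLastD_eq_getLast?, hl, show ¬free ≤ 0 by omega]
      rw [hRHS, pvMarkB_step col free (by omega) hmem]
      by_cases h1 : free - 1 ≤ 0
      · rw [pvMarkB_nonpos (pvFillFirst col) (free - 1) h1]
        simp [pvFillB, h1]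
      · rcases pvFillFirst_last col hl with hL | hR
        · simp [pvFillB, List.getLastD_eq_getLast?, hL, h1]
        · rw [pvMarkB_no_false (pvFillFirst col) (free - 1) hR]
          have hT := no_false_getLastD (pvFillFirst col) hR
          rw [List.getLastD_eq_getLast?] at hT
          simp [pvFillB, List.getLastD_eq_getLast?, hT, h1]
termination_by col.count false
decreasing_by
  exact pvFillFirst_count_lt col hmem

-- ===== VERDICT (by name: the statement is the Claim_ definition above) =====
theorem populate_columns_spec : Claim_equal_populate_columns := by
  intro l r n _ hpre
  obtain ⟨hn, hcase⟩ := hpre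
  unfold Spec_populate_columns
  show ((pvFillA l (pvFillA r n).2).1, (pvFillA r n).1) =
    ((pvFillB l (pvFillB r n).2).1, (pvFillB r n).1)
  have hrne : r = [] → n = 0 := by
    intro hr0
    rcases hcase with h0 | ⟨hr, _⟩
    · exact h0
    · exact absurd hr0 hr
  have hleft : l = [] → (pvFillB r n).2 = 0 := by
    intro hl0
    rcases hcase with h0 | ⟨hr, hrest⟩
    · subst h0
      simp [pvFillB]
    · rcases hrest with hl | ⟨hlast, hle⟩
      · exact absurd hl0 hl
      · by_cases hn0 : n ≤ 0
        · have : n = 0 := by omega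
          subst this
          simp [pvFillB]
        · simp only [pvFillB, if_neg hn0, hlast, Bool.false_eq_true, if_false]
          rw [pvMarkB_snd r n hn]
          omega
  have hrem2 : 0 ≤ (pvFillB r n).2 := by
    unfold pvFillB
    split_ifs with h1 h2
    · exact hn
    · exact hn
    · rw [pvMarkB_snd r n hn]
      omega
  have h1 : pvFillA r n = pvFillB r n := fillA_eq_fillB r n hn hrne
  have h2 : pvFillA l (pvFillB r n).2 = pvFillB l (pvFillB r n).2 :=
    fillA_eq_fillB l (pvFillB r n).2 hrem2 hleft
  rw [h1, h2]
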